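-- pv_equiv track=rewrite | github.com/shamir-khan-dev/CP-COURSES | khan4465_l08/src/functions.py | list_categorize
-- ===== SOURCE A (Python) =====
-- def list_categorize(values):
--     """
--     -------------------------------------------------------
--     Returns data about the categories of values in a list.
--     Use: negatives, positives, zeroes, evens, odds = list_categorize(values)
--     -------------------------------------------------------
--     Parameters:
--         values - a list of values (list of int)
--     Returns:
--         negatives - the number of negative values (int)
--         positives - the number of positive values (int)
--         zeroes - the number of zeroes (int)
--         evens - the number of even values (int)
--         odds - the number of odd values (int)
--     -------------------------------------------------------
--     """
--
--     total_negatives = 0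
--     total_positives = 0
--     total_zeroes = 0
--     total_evens = 0
--     total_odds = 0
--
--     for x in range(len(values)):
--         if(values[x] == 0):
--             total_zeroes+=1
--         if(values[x]%2 == 0):
--            total_evens+=1
--         else:
--              total_odds+=1
--         if(values[x] > 0):
--             total_positives+=1
--         if(values[x] < 0):
--             total_negatives+=1
--     return total_negatives,total_positives,total_zeroes,total_evens,total_odds
-- ===== SOURCE B (Python) =====
-- def list_categorize(values):
--     # Five independent scans instead of one interleaved indexed loop.
--     negatives = sum(1 for x in values if x < 0)
--     positives = sum(1 for x in values if x > 0)
--     zeroes = sum(1 for x in values if x == 0)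
--     evens = sum(1 for x in values if x % 2 == 0)
--     odds = len(values) - evens
--     return negatives, positives, zeroes, evens, odds
-- ===== Notes on version B (the rewrite author's own statement) =====
-- stated objective: simpler
-- what changed: Replaces A's single indexed loop maintaining five interleaved counters with five independent scans (one count per category), deriving odds as len(values) - evens.
import Mathlib
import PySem

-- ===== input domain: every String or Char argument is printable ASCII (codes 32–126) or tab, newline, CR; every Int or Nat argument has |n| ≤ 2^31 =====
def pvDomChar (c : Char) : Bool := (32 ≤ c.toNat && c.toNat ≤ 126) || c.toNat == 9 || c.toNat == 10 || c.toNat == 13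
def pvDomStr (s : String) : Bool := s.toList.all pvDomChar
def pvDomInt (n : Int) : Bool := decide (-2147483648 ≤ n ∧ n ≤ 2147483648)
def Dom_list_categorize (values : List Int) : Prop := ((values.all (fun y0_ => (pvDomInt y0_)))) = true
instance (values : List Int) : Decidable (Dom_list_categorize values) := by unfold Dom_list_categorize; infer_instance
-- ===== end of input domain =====

-- B replaces A's single interleaved five-counter loop with five independent scans
-- (one count per category, odds derived from evens); objective: simpler.

-- ===== PORT A =====
-- A iterates over indices and updates five counters; each index just reads values[x],
-- so the loop is transcribed as a fold over the elements with the five-counter state.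
def list_categorize (values : List Int) : Int × Int × Int × Int × Int :=
  let s := values.foldl
    (fun (s : Int × Int × Int × Int × Int) v =>
      let (n, p, z, e, o) := s
      let z := if v == 0 then z + 1 else z
      let (e, o) := if PySem.Int.mod v 2 == 0 then (e + 1, o) else (e, o + 1)
      let p := if v > 0 then p + 1 else p
      let n := if v < 0 then n + 1 else n
      (n, p, z, e, o))
    (0, 0, 0, 0, 0)
  s

-- ===== PORT B =====
def list_categorize_alt (values : List Int) : Int × Int × Int × Int × Int :=
  let negatives : Int := (values.countP (fun x => decide (x < 0)) : Nat)
  let positives : Int := (values.countP (fun x => decide (x > 0)) : Nat)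
  let zeroes : Int := (values.countP (fun x => x == 0) : Nat)
  let evens : Int := (values.countP (fun x => PySem.Int.mod x 2 == 0) : Nat)
  let odds : Int := (values.length : Nat) - evens
  (negatives, positives, zeroes, evens, odds)

-- ===== PRECONDITION & SPEC =====
def Spec_list_categorize (values : List Int) (out : Int × Int × Int × Int × Int) : Prop := out = list_categorize_alt values
instance (values : List Int) (out : Int × Int × Int × Int × Int) : Decidable (Spec_list_categorize values out) := by unfold Spec_list_categorize; infer_instance

-- ===== CLAIM (what is proved, stated in full; the proofs are below) =====
def Claim_equal_list_categorize : Prop := ∀ (values : List Int), Dom_list_categorize values → Spec_list_categorize values (list_categorize values)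

-- ===== LEMMAS AND PROOFS =====

-- A's fold, started from any accumulator, adds B's per-category counts.
theorem list_categorize_foldl_char (values : List Int) (n p z e o : Int) :
    values.foldl
      (fun (s : Int × Int × Int × Int × Int) v =>
        let (n, p, z, e, o) := s
        let z := if v == 0 then z + 1 else z
        let (e, o) := if PySem.Int.mod v 2 == 0 then (e + 1, o) else (e, o + 1)
        let p := if v > 0 then p + 1 else p
        let n := if v < 0 then n + 1 else n
        (n, p, z, e, o))
      (n, p, z, e, o)
    = (n + (values.countP (fun x => decide (x < 0)) : Nat),
       p + (values.countP (fun x => decide (x > 0)) : Nat),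
       z + (values.countP (fun x => x == 0) : Nat),
       e + (values.countP (fun x => PySem.Int.mod x 2 == 0) : Nat),
       o + ((values.length : Nat) - (values.countP (fun x => PySem.Int.mod x 2 == 0) : Nat))) := by
  induction values generalizing n p z e o with
  | nil => simp
  | cons v vs ih =>
    simp only [List.foldl_cons, List.countP_cons, List.length_cons]
    cases hz : (v == 0) <;>
      cases he : (PySem.Int.mod v 2 == 0) <;>
      by_cases hp : v > 0 <;>
      by_cases hn : v < 0 <;>
      simp only [hz, he, hp, hn, Bool.false_eq_true, ite_true, ite_false, ih,
        Prod.mk.injEq, decide_eq_true_eq, gt_iff_lt] <;>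
      refine ⟨?_, ?_, ?_, ?_, ?_⟩ <;> push_cast <;> ring

-- ===== VERDICT (by name: the statement is the Claim_ definition above) =====
theorem list_categorize_spec : Claim_equal_list_categorize := by
  intro values _
  show list_categorize values = list_categorize_alt values
  simp only [list_categorize, list_categorize_alt, list_categorize_foldl_char]
  simp
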